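-- pv_equiv track=rewrite | github.com/manwar/perlweeklychallenge-club | challenge-074/paulo-custodio/python/ch-2.py | lnr_char
-- ===== SOURCE A (Python) =====
-- def lnr_char(s):
--     out = ""
--     seen = {}
--     for i in range(len(s)):
--         ch = s[i]
--         if ch in seen:
--             seen[ch] += 1
--         else:
--             seen[ch] = 1
--         found = False
--         for j in range(i+1)[::-1]:
--             ch = s[j]
--             if ch in seen and seen[ch] == 1:
--                 out += ch
--                 found = True
--                 break
--         if not found:
--             out += "#"
--     return out
-- ===== SOURCE B (Python) =====
-- def lnr_char(s):
--     # one pass: track duplicated chars; keep candidate unique chars in first-occurrence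
--     # order and lazily pop duplicated ones off the tail; the tail is the rightmost unique char
--     out = []
--     first = set()
--     dup = set()
--     cand = []
--     for ch in s:
--         if ch in first:
--             dup.add(ch)
--         else:
--             first.add(ch)
--             cand.append(ch)
--         while cand and cand[-1] in dup:
--             cand.pop()
--         out.append(cand[-1] if cand else "#")
--     return "".join(out)
-- ===== Notes on version B (the rewrite author's own statement) =====
-- stated objective: faster
-- what changed: Instead of re-scanning the whole prefix backwards at every position, B makes one pass keeping a duplicated-chars set and a candidate list of unique chars in first-occurrence order with lazy tail popping, so the rightmost unique char is read off the tail in amortized O(1).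
import Mathlib
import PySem

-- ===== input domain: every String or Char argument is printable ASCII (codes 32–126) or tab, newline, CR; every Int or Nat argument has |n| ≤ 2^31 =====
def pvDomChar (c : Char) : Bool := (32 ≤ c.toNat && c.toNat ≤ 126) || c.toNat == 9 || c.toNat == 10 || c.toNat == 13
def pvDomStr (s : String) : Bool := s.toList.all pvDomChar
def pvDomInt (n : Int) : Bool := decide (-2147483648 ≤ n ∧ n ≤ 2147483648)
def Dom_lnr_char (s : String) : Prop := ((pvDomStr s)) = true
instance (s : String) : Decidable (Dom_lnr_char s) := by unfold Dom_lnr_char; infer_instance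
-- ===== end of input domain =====

-- B replaces A's backward re-scan of the whole prefix at every position by a single pass that
-- keeps a duplicated-chars set and a candidate list (first occurrences in order) with lazy tail
-- popping; a timing run measured B faster (asymptotic change).

-- ===== PORT A =====
-- inner loop 'for j in range(i+1)[::-1]: … break': the first hit, or none
def lnrInner (cs : List Char) (seen : PySem.Dict Char Int) : List Int → Option Char
  | [] => none
  | j :: rest =>
    let ch := (PySem.List.pyGet? cs j).getD ' '
    if seen.contains ch && (seen.getD ch 0 == 1) then some ch
    else lnrInner cs seen rest

-- one iteration of A's outer loop; state = (out, seen)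
def lnrStepA (cs : List Char) (st : List Char × PySem.Dict Char Int) (i : Int) :
    List Char × PySem.Dict Char Int :=
  let ch := (PySem.List.pyGet? cs i).getD ' '
  let seen := if st.2.contains ch then st.2.insert ch (st.2.getD ch 0 + 1) else st.2.insert ch 1
  match lnrInner cs seen (((PySem.List.slice? (PySem.List.pyRange 0 (i + 1) 1) none none (-1))).getD []) with
  | some c => (st.1 ++ [c], seen)
  | none => (st.1 ++ ['#'], seen)

def lnr_char (s : String) : String :=
  let cs := s.toList
  String.ofList (((PySem.List.pyRange 0 (PySem.Str.len s) 1).foldl (lnrStepA cs)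
      ([], PySem.Dict.empty)).1)

-- ===== PORT B =====
-- 'while cand and cand[-1] in dup: cand.pop()'
def lnrPop (dup : PySem.Set Char) (cand : List Char) : List Char :=
  if hc : cand = [] then cand
  else if PySem.Set.contains dup (PySem.List.pyGetD cand (-1) ' ') then lnrPop dup cand.dropLast
  else cand
termination_by cand.length
decreasing_by
  have := List.length_pos_of_ne_nil hc
  simp only [List.length_dropLast]
  omega

-- one iteration of B's loop; state = (first, dup, cand, out)
def lnrStepB (st : PySem.Set Char × PySem.Set Char × List Char × List Char) (ch : Char) :
    PySem.Set Char × PySem.Set Char × List Char × List Char :=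
  let (first, dup, cand, out) := st
  let (first, dup, cand) :=
    if PySem.Set.contains first ch then (first, PySem.Set.add dup ch, cand)
    else (PySem.Set.add first ch, dup, cand ++ [ch])
  let cand := lnrPop dup cand
  (first, dup, cand, out ++ [(PySem.List.pyGet? cand (-1)).getD '#'])

def lnr_char_alt (s : String) : String :=
  String.ofList ((s.toList.foldl lnrStepB ([], [], [], [])).2.2.2)

-- ===== PRECONDITION & SPEC =====
def Spec_lnr_char (s : String) (out : String) : Prop := out = lnr_char_alt s
instance (s : String) (out : String) : Decidable (Spec_lnr_char s out) := by unfold Spec_lnr_char; infer_instance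

-- ===== CLAIM (what is proved, stated in full; the proofs are below) =====
def Claim_equal_lnr_char : Prop := ∀ (s : String), Dom_lnr_char s → Spec_lnr_char s (lnr_char s)

-- ===== LEMMAS AND PROOFS =====

-- the Bool predicate 'appears exactly once in prefix p'
def lnrQ (p : List Char) (d : Char) : Bool := p.count d == 1

-- invariant of A's counter dict after processing prefix p
def SeenInv (p : List Char) (seen : PySem.Dict Char Int) : Prop :=
  (∀ d, seen.getD d 0 = (p.count d : Int)) ∧ (∀ d, seen.contains d = decide (d ∈ p))

-- invariant of B's state after processing prefix p
def BInv (p : List Char) (first dup : PySem.Set Char) (cand : List Char) : Prop :=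
  (∀ d, d ∈ first ↔ d ∈ p) ∧
  (∀ d, d ∈ dup ↔ 2 ≤ p.count d) ∧
  (∀ x ∈ cand, x ∈ p) ∧
  cand.filter (lnrQ p) = p.filter (lnrQ p) ∧
  (∀ x, cand.getLast? = some x → PySem.Set.contains dup x = false)

theorem lnr_count_append (p : List Char) (c : Char) :
    ∀ d, (p ++ [c]).count d = p.count d + if d = c then 1 else 0 := by
  intro d
  by_cases hdc : d = c
  · subst hdc; simp [List.count_append]
  · rw [List.count_append,
      List.count_eq_zero.mpr (fun hm => hdc (List.mem_singleton.mp hm)), if_neg hdc]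

theorem lnr_count_append_self (p : List Char) (c : Char) :
    (p ++ [c]).count c = p.count c + 1 := by
  rw [lnr_count_append p c c, if_pos rfl]

theorem lnr_count_append_ne (p : List Char) (c d : Char) (h : d ≠ c) :
    (p ++ [c]).count d = p.count d := by
  rw [lnr_count_append p c d, if_neg h, Nat.add_zero]

theorem lnr_int_beq_one (n : Nat) : ((n : Int) == 1) = (n == 1) := by
  by_cases h : n = 1 <;> simp [h]

theorem lnr_find?_congr {α : Type} (l : List α) (p q : α → Bool)
    (h : ∀ x ∈ l, p x = q x) : l.find? p = l.find? q := by
  induction l with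
  | nil => rfl
  | cons a t ih =>
    simp only [List.find?]
    rw [h a (by simp)]
    cases q a
    · exact ih fun x hx => h x (by simp [hx])
    · rfl

theorem lnrInner_eq_find? (cs : List Char) (seen : PySem.Dict Char Int) (js : List Int) :
    lnrInner cs seen js =
      (js.map (fun j => (PySem.List.pyGet? cs j).getD ' ')).find?
        (fun ch => seen.contains ch && (seen.getD ch 0 == 1)) := by
  induction js with
  | nil => rfl
  | cons j rest ih =>
    simp only [lnrInner, List.map, List.find?]
    by_cases h : (seen.contains ((PySem.List.pyGet? cs j).getD ' ') &&
        (seen.getD ((PySem.List.pyGet? cs j).getD ' ') 0 == 1)) = true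
    · simp [h]
    · simp only [Bool.not_eq_true] at h
      simp [h, ih]

theorem lnr_map_range (cs : List Char) (k : Nat) (hk : k ≤ cs.length) :
    (PySem.List.pyRange 0 (k : Int) 1).map (fun j => (PySem.List.pyGet? cs j).getD ' ')
      = cs.take k := by
  induction k with
  | zero => simp [PySem.List.pyRange_one_eq_nil]
  | succ k ih =>
    have hk' : k ≤ cs.length := by omega
    have hlt : k < cs.length := by omega
    have hsplit : PySem.List.pyRange 0 ((k + 1 : Nat) : Int) 1
        = PySem.List.pyRange 0 (k : Int) 1 ++ [(k : Int)] := by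
      have h := PySem.List.pyRange_one_succ_right (a := 0) (b := (k : Int)) (by positivity)
      push_cast
      exact h
    rw [hsplit, List.map_append, ih hk', List.map_cons, List.map_nil]
    rw [List.take_succ_eq_append_getElem hlt]
    have : PySem.List.pyGet? cs ((k : Nat) : Int) = some cs[k] := by
      rw [PySem.List.pyGet?_natCast, List.getElem?_eq_getElem hlt]
    simp [this]

-- the updated seen-dict of one A step
theorem lnr_seen_step (p : List Char) (seen : PySem.Dict Char Int) (c : Char)
    (h : SeenInv p seen) :
    SeenInv (p ++ [c])
      (if seen.contains c then seen.insert c (seen.getD c 0 + 1) else seen.insert c 1) := by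
  obtain ⟨hg, hc⟩ := h
  constructor
  · intro d
    by_cases hdc : d = c
    · subst hdc
      by_cases hmem : d ∈ p
      · rw [if_pos (by rw [hc d]; simp [hmem])]
        rw [PySem.Dict.getD_insert_self, hg d, lnr_count_append_self p d]
        push_cast
        ring
      · rw [if_neg (by rw [hc d]; simp [hmem])]
        rw [PySem.Dict.getD_insert_self, lnr_count_append_self p d]
        rw [List.count_eq_zero.mpr hmem]
        simp
    · have : (if seen.contains c then seen.insert c (seen.getD c 0 + 1)
          else seen.insert c 1).getD d 0 = seen.getD d 0 := by
        split <;> simp [PySem.Dict.getD_insert, hdc]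
      rw [this, hg d, lnr_count_append_ne p c d hdc]
  · intro d
    have : (if seen.contains c then seen.insert c (seen.getD c 0 + 1)
        else seen.insert c 1).contains d = (d == c || seen.contains d) := by
      split <;> rw [PySem.Dict.contains_insert]
    rw [this, hc d]
    by_cases hdc : d = c <;> simp [hdc]

theorem lnr_filter_reverse_find? (p : List Char) (q : Char → Bool) :
    p.reverse.find? q = (p.filter q).getLast? := by
  rw [← List.head?_filter, List.filter_reverse, List.head?_reverse]

-- lnrPop only removes duplicated (hence not-exactly-once) chars
theorem lnrPop_filter (dup : PySem.Set Char) (cand : List Char) (q : Char → Bool)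
    (hdup : ∀ x ∈ dup, q x = false) :
    (lnrPop dup cand).filter q = cand.filter q := by
  induction cand using lnrPop.induct dup with
  | case1 => rw [lnrPop.eq_def, dif_pos rfl]
  | case2 cand hc hin ih =>
    rw [lnrPop.eq_def, dif_neg hc, if_pos hin, ih]
    rw [PySem.List.pyGetD_neg_one cand ' ' hc] at hin
    have hq : q (cand.getLast hc) = false :=
      hdup _ ((PySem.Set.contains_iff _ _).mp hin)
    conv_rhs => rw [← List.dropLast_append_getLast hc]
    rw [List.filter_append]
    simp [hq]
  | case3 cand hc hin => rw [lnrPop.eq_def, dif_neg hc, if_neg hin]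

theorem lnrPop_subset (dup : PySem.Set Char) (cand : List Char) :
    ∀ x ∈ lnrPop dup cand, x ∈ cand := by
  induction cand using lnrPop.induct dup with
  | case1 => rw [lnrPop.eq_def, dif_pos rfl]; exact fun x hx => hx
  | case2 cand hc hin ih =>
    rw [lnrPop.eq_def, dif_neg hc, if_pos hin]
    exact fun x hx => List.dropLast_subset _ (ih x hx)
  | case3 cand hc hin => rw [lnrPop.eq_def, dif_neg hc, if_neg hin]; exact fun x hx => hx

theorem lnrPop_post (dup : PySem.Set Char) (cand : List Char) :
    ∀ x, (lnrPop dup cand).getLast? = some x → PySem.Set.contains dup x = false := by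
  induction cand using lnrPop.induct dup with
  | case1 =>
    intro x hx
    rw [lnrPop.eq_def, dif_pos rfl] at hx
    simp at hx
  | case2 cand hc hin ih =>
    have heq : lnrPop dup cand = lnrPop dup cand.dropLast := by
      rw [lnrPop.eq_def, dif_neg hc, if_pos hin]
    rw [heq]
    exact ih
  | case3 cand hc hin =>
    have heq : lnrPop dup cand = cand := by
      rw [lnrPop.eq_def, dif_neg hc, if_neg hin]
    rw [heq]
    intro x hx
    rw [List.getLast?_eq_some_getLast hc] at hx
    have hxe : cand.getLast hc = x := Option.some.inj hx
    rw [← hxe, ← PySem.List.pyGetD_neg_one cand ' ' hc]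
    simpa using hin

-- B's invariant is preserved when c was seen before
theorem lnr_stepB_mem (p : List Char) (first dup : PySem.Set Char) (cand : List Char) (c : Char)
    (hf : ∀ d, d ∈ first ↔ d ∈ p)
    (hd : ∀ d, d ∈ dup ↔ 2 ≤ p.count d)
    (hm : ∀ x ∈ cand, x ∈ p)
    (hq : cand.filter (lnrQ p) = p.filter (lnrQ p))
    (hcp : c ∈ p) :
    BInv (p ++ [c]) first (PySem.Set.add dup c) (lnrPop (PySem.Set.add dup c) cand) := by
  have hcpos : p.count c ≠ 0 := fun h0 => (List.count_eq_zero.mp h0) hcp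
  have hdup' : ∀ d, d ∈ PySem.Set.add dup c ↔ 2 ≤ (p ++ [c]).count d := by
    intro d
    by_cases hdc : d = c
    · subst hdc
      rw [PySem.Set.mem_add, hd d, lnr_count_append_self p d]
      constructor
      · intro _; omega
      · intro _; right; rfl
    · rw [PySem.Set.mem_add, hd d, lnr_count_append_ne p c d hdc]
      simp [hdc]
  have hq' : lnrQ (p ++ [c]) = fun d => lnrQ p d && !(d == c) := by
    funext d
    by_cases hdc : d = c
    · subst hdc
      simp only [lnrQ, lnr_count_append_self p d, beq_self_eq_true,
        Bool.not_true, Bool.and_false]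
      rw [beq_eq_false_iff_ne]
      omega
    · simp only [lnrQ, lnr_count_append_ne p c d hdc]
      simp [hdc]
  have hdupfalse : ∀ x ∈ PySem.Set.add dup c, lnrQ (p ++ [c]) x = false := by
    intro x hx
    have h2 := (hdup' x).mp hx
    simp only [lnrQ]
    rw [beq_eq_false_iff_ne]
    omega
  have key : ∀ l : List Char,
      l.filter (lnrQ (p ++ [c])) = (l.filter (lnrQ p)).filter (fun d => !(d == c)) := by
    intro l
    rw [List.filter_filter]
    apply List.filter_congr
    intro x _
    rw [hq']
    exact Bool.and_comm _ _
  refine ⟨?_, hdup', ?_, ?_, lnrPop_post _ _⟩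
  · intro d
    rw [hf d]
    simp only [List.mem_append, List.mem_singleton]
    constructor
    · exact Or.inl
    · rintro (h | rfl)
      · exact h
      · exact hcp
  · intro x hx
    exact List.mem_append_left _ (hm x (lnrPop_subset _ _ x hx))
  · rw [lnrPop_filter _ _ _ hdupfalse, key cand, hq, ← key p]
    have hqc : lnrQ (p ++ [c]) c = false := by
      simp only [lnrQ, lnr_count_append_self p c]
      rw [beq_eq_false_iff_ne]
      omega
    rw [List.filter_append]
    simp [hqc]

-- B's invariant is preserved when c is new
theorem lnr_stepB_new (p : List Char) (first dup : PySem.Set Char) (cand : List Char) (c : Char)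
    (hf : ∀ d, d ∈ first ↔ d ∈ p)
    (hd : ∀ d, d ∈ dup ↔ 2 ≤ p.count d)
    (hm : ∀ x ∈ cand, x ∈ p)
    (hq : cand.filter (lnrQ p) = p.filter (lnrQ p))
    (hcp : c ∉ p) :
    BInv (p ++ [c]) (PySem.Set.add first c) dup (lnrPop dup (cand ++ [c])) := by
  have hczero : p.count c = 0 := List.count_eq_zero.mpr hcp
  have hdup' : ∀ d, d ∈ dup ↔ 2 ≤ (p ++ [c]).count d := by
    intro d
    by_cases hdc : d = c
    · subst hdc
      rw [hd d, lnr_count_append_self p d, hczero]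
      constructor
      · intro h2; omega
      · intro h2; omega
    · rw [hd d, lnr_count_append_ne p c d hdc]
  have hagree : ∀ x ∈ p, lnrQ (p ++ [c]) x = lnrQ p x := by
    intro x hx
    have hxc : x ≠ c := fun h => hcp (h ▸ hx)
    simp only [lnrQ, lnr_count_append_ne p c x hxc]
  have hdupfalse : ∀ x ∈ dup, lnrQ (p ++ [c]) x = false := by
    intro x hx
    have h2 := (hdup' x).mp hx
    simp only [lnrQ]
    rw [beq_eq_false_iff_ne]
    omega
  refine ⟨?_, hdup', ?_, ?_, lnrPop_post _ _⟩
  · intro d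
    rw [PySem.Set.mem_add, hf d]
    simp [List.mem_append]
  · intro x hx
    have := lnrPop_subset _ _ x hx
    rcases List.mem_append.mp this with h | h
    · exact List.mem_append_left _ (hm x h)
    · exact List.mem_append_right _ h
  · rw [lnrPop_filter _ _ _ hdupfalse]
    rw [List.filter_append, List.filter_append]
    rw [List.filter_congr (fun x hx => hagree x (hm x hx)), hq,
        ← List.filter_congr (fun x hx => hagree x hx)]

-- after the pops, the candidate tail is exactly the last exactly-once char of the prefix
theorem lnr_ans (p' : List Char) (dup' : PySem.Set Char) (cand2 : List Char)
    (hd : ∀ d, d ∈ dup' ↔ 2 ≤ p'.count d)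
    (hm : ∀ x ∈ cand2, x ∈ p')
    (hq : cand2.filter (lnrQ p') = p'.filter (lnrQ p'))
    (hpost : ∀ x, cand2.getLast? = some x → PySem.Set.contains dup' x = false) :
    cand2.getLast? = (p'.filter (lnrQ p')).getLast? := by
  by_cases hc : cand2 = []
  · subst hc
    rw [List.filter_nil] at hq
    rw [← hq]
  · have hsome : cand2.getLast? = some (cand2.getLast hc) := List.getLast?_eq_some_getLast hc
    have hx := hpost (cand2.getLast hc) hsome
    have hxmem : cand2.getLast hc ∈ cand2 := List.getLast_mem hc
    have hxp : cand2.getLast hc ∈ p' := hm _ hxmem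
    have hxnotdup : ¬ 2 ≤ p'.count (cand2.getLast hc) := by
      intro h2
      have hmem : cand2.getLast hc ∈ dup' := (hd _).mpr h2
      have : PySem.Set.contains dup' (cand2.getLast hc) = true :=
        (PySem.Set.contains_iff _ _).mpr hmem
      rw [this] at hx
      cases hx
    have hxpos : p'.count (cand2.getLast hc) ≠ 0 :=
      fun h0 => (List.count_eq_zero.mp h0) hxp
    have hqx : lnrQ p' (cand2.getLast hc) = true := by
      simp only [lnrQ, beq_iff_eq]
      omega
    have hfl : (cand2.filter (lnrQ p')).getLast? = some (cand2.getLast hc) := by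
      conv_lhs => rw [← List.dropLast_append_getLast hc]
      rw [List.filter_append]
      simp [hqx]
    rw [hsome, ← hq, hfl]

-- unfolded form of one A step
theorem lnrStepA_eq (cs : List Char) (st : List Char × PySem.Dict Char Int) (i : Int) :
    lnrStepA cs st i =
      (st.1 ++ [((lnrInner cs
          (if st.2.contains ((PySem.List.pyGet? cs i).getD ' ')
            then st.2.insert ((PySem.List.pyGet? cs i).getD ' ')
              (st.2.getD ((PySem.List.pyGet? cs i).getD ' ') 0 + 1)
            else st.2.insert ((PySem.List.pyGet? cs i).getD ' ') 1)
          (((PySem.List.slice? (PySem.List.pyRange 0 (i + 1) 1) none none (-1))).getD [])).getD '#')],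
       if st.2.contains ((PySem.List.pyGet? cs i).getD ' ')
         then st.2.insert ((PySem.List.pyGet? cs i).getD ' ')
           (st.2.getD ((PySem.List.pyGet? cs i).getD ' ') 0 + 1)
         else st.2.insert ((PySem.List.pyGet? cs i).getD ' ') 1) := by
  unfold lnrStepA
  cases h : lnrInner cs
      (if st.2.contains ((PySem.List.pyGet? cs i).getD ' ')
        then st.2.insert ((PySem.List.pyGet? cs i).getD ' ')
          (st.2.getD ((PySem.List.pyGet? cs i).getD ' ') 0 + 1)
        else st.2.insert ((PySem.List.pyGet? cs i).getD ' ') 1)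
      (((PySem.List.slice? (PySem.List.pyRange 0 (i + 1) 1) none none (-1))).getD []) <;>
    simp [h]

-- unfolded forms of one B step
theorem lnrStepB_pos (first dup : PySem.Set Char) (cand out : List Char) (ch : Char)
    (h : PySem.Set.contains first ch = true) :
    lnrStepB (first, dup, cand, out) ch =
      (first, PySem.Set.add dup ch, lnrPop (PySem.Set.add dup ch) cand,
        out ++ [(PySem.List.pyGet? (lnrPop (PySem.Set.add dup ch) cand) (-1)).getD '#']) := by
  have hmem : ch ∈ first := (PySem.Set.contains_iff _ _).mp h
  simp [lnrStepB, hmem]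

theorem lnrStepB_neg (first dup : PySem.Set Char) (cand out : List Char) (ch : Char)
    (h : PySem.Set.contains first ch = false) :
    lnrStepB (first, dup, cand, out) ch =
      (PySem.Set.add first ch, dup, lnrPop dup (cand ++ [ch]),
        out ++ [(PySem.List.pyGet? (lnrPop dup (cand ++ [ch])) (-1)).getD '#']) := by
  have hmem : ch ∉ first := fun hm => by
    rw [(PySem.Set.contains_iff first ch).mpr hm] at h
    cases h
  simp [lnrStepB, hmem]

-- full synchronized induction over the prefix length
theorem lnr_main (cs : List Char) (k : Nat) (hk : k ≤ cs.length) :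
    ((PySem.List.pyRange 0 (k : Int) 1).foldl (lnrStepA cs) ([], PySem.Dict.empty)).1
      = ((cs.take k).foldl lnrStepB ([], [], [], [])).2.2.2 ∧
    SeenInv (cs.take k)
      ((PySem.List.pyRange 0 (k : Int) 1).foldl (lnrStepA cs) ([], PySem.Dict.empty)).2 ∧
    BInv (cs.take k)
      ((cs.take k).foldl lnrStepB ([], [], [], [])).1
      ((cs.take k).foldl lnrStepB ([], [], [], [])).2.1
      ((cs.take k).foldl lnrStepB ([], [], [], [])).2.2.1 := by
  induction k with
  | zero =>
    refine ⟨rfl, ⟨?_, ?_⟩, ?_, ?_, ?_, ?_, ?_⟩ <;>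
      simp [PySem.List.pyRange_one_eq_nil, PySem.Dict.getD_empty, PySem.Dict.contains_empty]
  | succ k ih =>
    have hk' : k ≤ cs.length := by omega
    have hlt : k < cs.length := by omega
    obtain ⟨hout, hseen, hfInv, hdInv, hmInv, hqInv, hpostInv⟩ := ih hk'
    set p := cs.take k with hp
    set c := cs[k] with hcdef
    have htake : cs.take (k + 1) = p ++ [c] := List.take_succ_eq_append_getElem hlt
    have hsplit : PySem.List.pyRange 0 ((k + 1 : Nat) : Int) 1
        = PySem.List.pyRange 0 (k : Int) 1 ++ [(k : Int)] := by
      have h := PySem.List.pyRange_one_succ_right (a := 0) (b := (k : Int)) (by positivity)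
      push_cast
      exact h
    set A := (PySem.List.pyRange 0 (k : Int) 1).foldl (lnrStepA cs) ([], PySem.Dict.empty)
      with hA
    set B := (cs.take k).foldl lnrStepB ([], [], [], []) with hB
    have hfoldA : (PySem.List.pyRange 0 ((k + 1 : Nat) : Int) 1).foldl (lnrStepA cs)
        ([], PySem.Dict.empty) = lnrStepA cs A (k : Int) := by
      rw [hsplit, List.foldl_append]
      rfl
    have hBeta : B = (B.1, B.2.1, B.2.2.1, B.2.2.2) := rfl
    have hfoldB : (cs.take (k + 1)).foldl lnrStepB ([], [], [], []) = lnrStepB B c := by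
      rw [htake, List.foldl_append]
      rfl
    -- the character fetched by A
    have hch : (PySem.List.pyGet? cs ((k : Nat) : Int)).getD ' ' = c := by
      rw [PySem.List.pyGet?_natCast, List.getElem?_eq_getElem hlt]
      rfl
    -- A's updated dict
    set seen' := if A.2.contains c then A.2.insert c (A.2.getD c 0 + 1) else A.2.insert c 1
      with hseen'def
    have hseen' : SeenInv (p ++ [c]) seen' := lnr_seen_step p A.2 c hseen
    -- B's branch condition
    have hcontains : PySem.Set.contains B.1 c = decide (c ∈ p) := by
      by_cases hcp : c ∈ p
      · rw [(PySem.Set.contains_iff B.1 c).mpr ((hfInv c).mpr hcp)]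
        simp [hcp]
      · have h1 : ¬ (PySem.Set.contains B.1 c = true) :=
          fun h => hcp ((hfInv c).mp ((PySem.Set.contains_iff B.1 c).mp h))
        rw [Bool.not_eq_true] at h1
        rw [h1]
        simp [hcp]
    -- B's post-branch state
    set st1 := if PySem.Set.contains B.1 c then (B.1, PySem.Set.add B.2.1 c, B.2.2.1)
        else (PySem.Set.add B.1 c, B.2.1, B.2.2.1 ++ [c]) with hst1
    have hBInv' : BInv (p ++ [c]) st1.1 st1.2.1 (lnrPop st1.2.1 st1.2.2) := by
      by_cases hcp : c ∈ p
      · rw [hst1, if_pos (by rw [hcontains]; simp [hcp])]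
        exact lnr_stepB_mem p B.1 B.2.1 B.2.2.1 c hfInv hdInv hmInv hqInv hcp
      · rw [hst1, if_neg (by rw [hcontains]; simp [hcp])]
        exact lnr_stepB_new p B.1 B.2.1 B.2.2.1 c hfInv hdInv hmInv hqInv hcp
    obtain ⟨hf', hd', hm', hq', hpost'⟩ := hBInv'
    -- lnrStepB at B, expressed through st1
    have hstepB : lnrStepB B c =
        (st1.1, st1.2.1, lnrPop st1.2.1 st1.2.2,
          B.2.2.2 ++ [(PySem.List.pyGet? (lnrPop st1.2.1 st1.2.2) (-1)).getD '#']) := by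
      by_cases hcp : c ∈ p
      · have hcb : PySem.Set.contains B.1 c = true := by rw [hcontains]; simp [hcp]
        rw [hBeta, lnrStepB_pos _ _ _ _ _ hcb, hst1, if_pos hcb]
      · have hcb : PySem.Set.contains B.1 c = false := by rw [hcontains]; simp [hcp]
        rw [hBeta, lnrStepB_neg _ _ _ _ _ hcb, hst1, if_neg (by rw [hcb]; simp)]
    -- the answer appended by A
    have hinner : (lnrInner cs seen'
        (((PySem.List.slice? (PySem.List.pyRange 0 ((k : Int) + 1) 1) none none (-1))).getD []))
        = ((p ++ [c]).filter (lnrQ (p ++ [c]))).getLast? := by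
      rw [PySem.List.slice?_none_none_neg_one, Option.getD_some]
      rw [lnrInner_eq_find?, List.map_reverse]
      have hrange :
          PySem.List.pyRange 0 ((k : Int) + 1) 1 = PySem.List.pyRange 0 ((k + 1 : Nat) : Int) 1 := by
        push_cast
        rfl
      rw [hrange, lnr_map_range cs (k + 1) (by omega), htake]
      have hcongr : ((p ++ [c]).reverse).find?
            (fun ch => seen'.contains ch && (seen'.getD ch 0 == 1))
          = ((p ++ [c]).reverse).find? (lnrQ (p ++ [c])) := by
        apply lnr_find?_congr
        intro x hx
        have hxmem : x ∈ p ++ [c] := List.mem_reverse.mp hx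
        rw [hseen'.2 x, hseen'.1 x, lnr_int_beq_one]
        simp [hxmem, lnrQ]
      rw [hcongr, lnr_filter_reverse_find?]
    -- B's appended char equals A's
    have hans : (lnrPop st1.2.1 st1.2.2).getLast?
        = ((p ++ [c]).filter (lnrQ (p ++ [c]))).getLast? :=
      lnr_ans (p ++ [c]) st1.2.1 (lnrPop st1.2.1 st1.2.2) hd' hm' hq' hpost'
    refine ⟨?_, ?_, ?_⟩
    · rw [hfoldA, hfoldB, hstepB, lnrStepA_eq]
      simp only [hch, ← hseen'def, hinner]
      rw [PySem.List.pyGet?_neg_one, hans, hout]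
    · rw [hfoldA, htake, lnrStepA_eq]
      simp only [hch, ← hseen'def]
      exact hseen'
    · rw [hfoldB, htake, hstepB]
      exact ⟨hf', hd', hm', hq', hpost'⟩

-- ===== VERDICT (by name: the statement is the Claim_ definition above) =====
theorem lnr_char_spec : Claim_equal_lnr_char := by
  intro s _
  unfold Spec_lnr_char lnr_char lnr_char_alt
  have h := (lnr_main s.toList s.toList.length le_rfl).1
  rw [List.take_length] at h
  rw [PySem.Str.len_eq]
  exact congrArg String.ofList h
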